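-- pv_equiv track=rewrite | github.com/edoriggio/algorithms-and-data-structures | exercises/ex_212.py | algo_x
-- ===== SOURCE A (Python) =====
-- def algo_x(A, x):
--     i = len(A)-1
--     j = 0
--
--     # While loop -> n^2
--     while i > 0:
--         if j == i:
--             j = 0
--             i -= 1
--         elif A[i] - A[j] > x or A[j] - A[i] > x:
--             return True
--         else:
--             j += 1
--
--     return False
-- ===== SOURCE B (Python) =====
-- def algo_x(A, x):
--     if len(A) < 2:
--         return False
--     s = sorted(A)
--     return s[-1] - s[0] > x
-- ===== Notes on version B (the rewrite author's own statement) =====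
-- stated objective: faster
-- what changed: Replaces the quadratic pairwise while-loop scan with sorting a copy once and comparing the two endpoints (max - min > x).
import Mathlib
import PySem

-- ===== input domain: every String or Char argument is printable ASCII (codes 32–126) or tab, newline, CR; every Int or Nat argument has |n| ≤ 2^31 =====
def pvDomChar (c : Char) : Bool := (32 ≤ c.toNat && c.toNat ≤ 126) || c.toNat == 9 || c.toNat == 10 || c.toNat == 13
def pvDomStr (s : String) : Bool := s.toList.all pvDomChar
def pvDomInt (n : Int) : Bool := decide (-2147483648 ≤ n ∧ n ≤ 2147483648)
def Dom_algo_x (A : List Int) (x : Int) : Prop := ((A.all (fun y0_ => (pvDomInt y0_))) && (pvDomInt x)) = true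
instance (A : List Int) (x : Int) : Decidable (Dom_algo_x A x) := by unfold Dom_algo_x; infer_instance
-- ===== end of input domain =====

-- B replaces A's quadratic pairwise while-loop with sort-once-and-compare-endpoints (faster).

-- ===== PORT A =====
-- Literal port of A's while loop over the int state (i, j); the fuel argument only
-- makes the recursion total (the loop itself terminates on every reachable state).
def algo_x_loop (A : List Int) (x : Int) : Nat → Int → Int → Bool
  | 0, _, _ => false
  | fuel+1, i, j =>
    if i > 0 then
      if j == i then algo_x_loop A x fuel (i-1) 0
      else if PySem.List.pyGetD A i 0 - PySem.List.pyGetD A j 0 > x ∨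
              PySem.List.pyGetD A j 0 - PySem.List.pyGetD A i 0 > x then true
      else algo_x_loop A x fuel i (j+1)
    else false

def algo_x (A : List Int) (x : Int) : Bool :=
  algo_x_loop A x ((A.length + 1) * (A.length + 1)) ((A.length : Int) - 1) 0

-- ===== PORT B =====
def algo_x_alt (A : List Int) (x : Int) : Bool :=
  if A.length < 2 then false
  else
    let s := PySem.List.sorted A (fun y => y) false
    decide (PySem.List.pyGetD s (-1) 0 - PySem.List.pyGetD s 0 0 > x)

-- ===== PRECONDITION & SPEC =====
def Spec_algo_x (A : List Int) (x : Int) (out : Bool) : Prop := out = algo_x_alt A x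
instance (A : List Int) (x : Int) (out : Bool) : Decidable (Spec_algo_x A x out) := by unfold Spec_algo_x; infer_instance

-- ===== CLAIM (what is proved, stated in full; the proofs are below) =====
def Claim_equal_algo_x : Prop := ∀ (A : List Int) (x : Int), Dom_algo_x A x → Spec_algo_x A x (algo_x A x)

-- ===== LEMMAS AND PROOFS =====

-- "some pair of distinct positions differs by more than x" (as values with membership)
def pvKey (A : List Int) (x : Int) : Prop :=
  2 ≤ A.length ∧ ∃ a ∈ A, ∃ b ∈ A, a - b > x

-- pairs still to be scanned from state (i, j)
def pvBad (A : List Int) (x : Int) (i j : Int) : Prop :=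
  ∃ p q : Int, 0 ≤ q ∧ q < p ∧ p ≤ i ∧ (p = i → j ≤ q) ∧
    (PySem.List.pyGetD A p 0 - PySem.List.pyGetD A q 0 > x ∨
     PySem.List.pyGetD A q 0 - PySem.List.pyGetD A p 0 > x)

theorem pv_loop_char (A : List Int) (x : Int) :
    ∀ (f : Nat) (i j : Int), 0 ≤ j → j ≤ i → i < (A.length : Int) →
      (i.toNat + 1) * (i.toNat + 1) ≤ f + j.toNat →
      (algo_x_loop A x f i j = true ↔ pvBad A x i j) := by
  intro f
  induction f with
  | zero =>
    intro i j hj hji hi hf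
    exfalso
    have h1 : j.toNat ≤ i.toNat := Int.toNat_le_toNat hji
    have h2 : i.toNat + 1 ≤ (i.toNat + 1) * (i.toNat + 1) :=
      Nat.le_mul_of_pos_left _ (by omega)
    omega
  | succ f ih =>
    intro i j hj hji hi hf
    by_cases hipos : i > 0
    · by_cases hji2 : j = i
      · subst hji2
        have h1 : algo_x_loop A x (f+1) j j = algo_x_loop A x f (j-1) 0 := by
          simp [algo_x_loop, hipos]
        have hfuel : ((j-1).toNat + 1) * ((j-1).toNat + 1) ≤ f + (0 : Int).toNat := by
          have hm : (j-1).toNat = j.toNat - 1 := by omega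
          have hjt : 0 < j.toNat := by omega
          set m := j.toNat with hmdef
          have hexp : (m + 1) * (m + 1) = m * m + m + m + 1 := by ring
          have hexp2 : (m - 1 + 1) * (m - 1 + 1) = m * m := by
            have : m - 1 + 1 = m := by omega
            rw [this]
          rw [hm, hexp2]
          omega
        rw [h1, ih (j-1) 0 le_rfl (by omega) (by omega) hfuel]
        constructor
        · rintro ⟨p, q, h0q, hqp, hpi, _, hd⟩
          exact ⟨p, q, h0q, hqp, by omega, by omega, hd⟩
        · rintro ⟨p, q, h0q, hqp, hpi, hpe, hd⟩
          refine ⟨p, q, h0q, hqp, by omega, ?_, hd⟩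
          intro hpj; omega
      · by_cases hd : PySem.List.pyGetD A i 0 - PySem.List.pyGetD A j 0 > x ∨
                      PySem.List.pyGetD A j 0 - PySem.List.pyGetD A i 0 > x
        · have h1 : algo_x_loop A x (f+1) i j = true := by
            simp only [algo_x_loop]
            rw [if_pos hipos, if_neg (by simpa using hji2), if_pos hd]
          rw [h1]
          constructor
          · intro _
            exact ⟨i, j, hj, by omega, le_rfl, fun _ => le_rfl, hd⟩
          · intro _; rfl
        · have h1 : algo_x_loop A x (f+1) i j = algo_x_loop A x f i (j+1) := by
            simp only [algo_x_loop]
            rw [if_pos hipos, if_neg (by simpa using hji2), if_neg hd]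
          rw [h1, ih i (j+1) (by omega) (by omega) hi (by omega)]
          constructor
          · rintro ⟨p, q, h0q, hqp, hpi, hpe, hdd⟩
            exact ⟨p, q, h0q, hqp, hpi, fun hh => by have := hpe hh; omega, hdd⟩
          · rintro ⟨p, q, h0q, hqp, hpi, hpe, hdd⟩
            refine ⟨p, q, h0q, hqp, hpi, ?_, hdd⟩
            intro hpieq
            rcases lt_or_eq_of_le (hpe hpieq) with h | h
            · omega
            · exfalso
              subst hpieq
              rw [← h] at hdd
              exact hd hdd
    · -- i ≤ 0, so with 0 ≤ j ≤ i we have i = 0: loop returns false, and pvBad is empty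
      have h1 : algo_x_loop A x (f+1) i j = false := by simp [algo_x_loop, hipos]
      rw [h1]
      constructor
      · intro h; cases h
      · rintro ⟨p, q, h0q, hqp, hpi, _, _⟩; omega

-- values at two distinct valid indices give the membership form, and back
theorem pv_bad_iff_key (A : List Int) (x : Int) (h1 : 1 ≤ A.length) :
    pvBad A x ((A.length : Int) - 1) 0 ↔ pvKey A x := by
  constructor
  · rintro ⟨p, q, h0q, hqp, hpi, _, hd⟩
    have hpr : PySem.Raise.InRange A.length p := by
      simp only [PySem.Raise.InRange]; omega
    have hqr : PySem.Raise.InRange A.length q := by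
      simp only [PySem.Raise.InRange]; omega
    have hpm := PySem.List.pyGetD_mem A (0 : Int) hpr
    have hqm := PySem.List.pyGetD_mem A (0 : Int) hqr
    refine ⟨by omega, ?_⟩
    rcases hd with hd | hd
    · exact ⟨_, hpm, _, hqm, hd⟩
    · exact ⟨_, hqm, _, hpm, hd⟩
  · rintro ⟨hlen, a, ha, b, hb, hab⟩
    rcases List.mem_iff_getElem.mp ha with ⟨ka, hka, rfl⟩
    rcases List.mem_iff_getElem.mp hb with ⟨kb, hkb, rfl⟩
    have hga : PySem.List.pyGetD A ((ka : Nat) : Int) 0 = A[ka] := by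
      rw [PySem.List.pyGetD_eq_getElem A 0 (by omega) (by exact_mod_cast hka)]
      simp
    have hgb : PySem.List.pyGetD A ((kb : Nat) : Int) 0 = A[kb] := by
      rw [PySem.List.pyGetD_eq_getElem A 0 (by omega) (by exact_mod_cast hkb)]
      simp
    have hgl : PySem.List.pyGetD A ((A.length : Int) - 1) 0 = A[A.length - 1] := by
      rw [PySem.List.pyGetD_eq_getElem A 0 (by omega) (by omega)]
      congr 1
      omega
    rcases lt_trichotomy ka kb with h | h | h
    · exact ⟨(kb : Int), (ka : Int), by omega, by exact_mod_cast h, by omega,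
        fun _ => by omega, Or.inr (by rw [hga, hgb]; omega)⟩
    · -- same index: a = b, so x < 0; compare positions (len-1) and 0
      subst h
      have hx : x < 0 := by omega
      have hg0 : PySem.List.pyGetD A (0 : Int) 0 = A[0] := by
        rw [PySem.List.pyGetD_eq_getElem A 0 (by omega) (by exact_mod_cast (by omega : 0 < A.length))]
        simp only [Int.toNat_zero]
        rfl
      by_cases hle : A[0]'(by omega) ≤ A[A.length - 1]'(by omega)
      · exact ⟨(A.length : Int) - 1, 0, by omega, by omega, by omega, fun _ => by omega,
          Or.inl (by rw [hgl, hg0]; omega)⟩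
      · exact ⟨(A.length : Int) - 1, 0, by omega, by omega, by omega, fun _ => by omega,
          Or.inr (by rw [hgl, hg0]; omega)⟩
    · exact ⟨(ka : Int), (kb : Int), by omega, by exact_mod_cast h, by omega,
        fun _ => by omega, Or.inl (by rw [hga, hgb]; omega)⟩

theorem pv_A_iff_key (A : List Int) (x : Int) : algo_x A x = true ↔ pvKey A x := by
  unfold algo_x
  rcases Nat.eq_zero_or_pos A.length with h0 | hpos
  · rw [h0]
    constructor
    · intro h
      simp [algo_x_loop] at h
    · rintro ⟨hlen, -⟩
      omega
  · rw [pv_loop_char A x _ _ _ le_rfl (by omega) (by omega)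
        (by have hq : ((A.length : Int) - 1).toNat = A.length - 1 := by omega
            rw [hq]
            have : (A.length - 1 + 1) = A.length := by omega
            rw [this]
            have hle : A.length * A.length ≤ (A.length + 1) * (A.length + 1) :=
              Nat.mul_le_mul (by omega) (by omega)
            omega)]
    exact pv_bad_iff_key A x hpos

theorem pv_B_iff_key (A : List Int) (x : Int) : algo_x_alt A x = true ↔ pvKey A x := by
  unfold algo_x_alt
  by_cases hlen : A.length < 2
  · rw [if_pos hlen]
    constructor
    · intro h
      cases h
    · rintro ⟨h2, -⟩
      omega
  · rw [if_neg hlen]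
    set s := PySem.List.sorted A (fun y => y) false with hs
    have hlens : s.length = A.length := by rw [hs]; exact PySem.List.length_sorted ..
    have hne : s ≠ [] := by
      intro h
      rw [h] at hlens
      simp at hlens
      omega
    have hlast : PySem.List.pyGetD s (-1) 0 = s.getLast hne := PySem.List.pyGetD_neg_one s 0 hne
    have hzero : PySem.List.pyGetD s (0 : Int) 0 = s[0]'(by omega) := by
      rw [PySem.List.pyGetD_eq_getElem s 0 (by omega) (by exact_mod_cast (by omega : 0 < s.length))]
      simp
    simp only [decide_eq_true_eq, hlast, hzero]
    constructor
    · intro h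
      have hlm : s.getLast hne ∈ s := List.getLast_mem hne
      have h0m : s[0]'(by omega) ∈ s := List.getElem_mem _
      refine ⟨by omega, s.getLast hne, ?_, s[0]'(by omega), ?_, h⟩
      · exact (PySem.List.mem_sorted A _ false _).mp (by rw [← hs]; exact hlm)
      · exact (PySem.List.mem_sorted A _ false _).mp (by rw [← hs]; exact h0m)
    · rintro ⟨-, a, ha, b, hb, hab⟩
      have has : a ∈ s := by rw [hs]; exact (PySem.List.mem_sorted A _ false a).mpr ha
      have hbs : b ∈ s := by rw [hs]; exact (PySem.List.mem_sorted A _ false b).mpr hb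
      rcases List.mem_iff_getElem.mp has with ⟨pa, hpa, rfl⟩
      rcases List.mem_iff_getElem.mp hbs with ⟨pb, hpb, rfl⟩
      have hup : s[pa] ≤ s[s.length - 1]'(by omega) := by
        have h := PySem.List.sorted_id_getElem_mono A (p := pa) (q := s.length - 1)
          (by omega) (by rw [← hs]; omega)
        exact h
      have hlo : s[0]'(by omega) ≤ s[pb] := by
        have h := PySem.List.sorted_id_getElem_mono A (p := 0) (q := pb)
          (by omega) (by rw [← hs]; omega)
        exact h
      have hlg : s.getLast hne = s[s.length - 1]'(by omega) := List.getLast_eq_getElem hne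
      rw [hlg]
      omega

-- ===== VERDICT (by name: the statement is the Claim_ definition above) =====
theorem algo_x_spec : Claim_equal_algo_x := by
  intro A x _
  unfold Spec_algo_x
  have hA := pv_A_iff_key A x
  have hB := pv_B_iff_key A x
  by_cases hk : pvKey A x
  · rw [hA.mpr hk, hB.mpr hk]
  · cases hb : algo_x_alt A x with
    | false =>
      cases ha : algo_x A x with
      | false => rfl
      | true => exact absurd (hA.mp ha) hk
    | true => exact absurd (hB.mp hb) hk
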